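-- pv_equiv track=rewrite | github.com/yannickloth/W33-Theory | tools/fit_ce2_simple_family_sign_polynomial.py | _row_feature_mask
-- ===== SOURCE A (Python) =====
-- from itertools import combinations
--
-- def _row_feature_mask(
--     mask_to_feature_idx: dict[int, int],
--     input_bits_mask: int,
--     max_degree: int,
-- ) -> int:
--     """Return feature-mask (length n_features) for monomials satisfied by input."""
--     ones = [i for i in range(18) if ((input_bits_mask >> i) & 1)]
--     # constant term always 1
--     feature_mask = 1 << mask_to_feature_idx[0]
--     for d in range(1, min(max_degree, len(ones)) + 1):
--         for combo in combinations(ones, d):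
--             m = 0
--             for b in combo:
--                 m |= 1 << b
--             feature_mask |= 1 << mask_to_feature_idx[m]
--     return feature_mask
-- ===== SOURCE B (Python) =====
-- def _row_feature_mask(
--     mask_to_feature_idx: dict[int, int],
--     input_bits_mask: int,
--     max_degree: int,
-- ) -> int:
--     """Return feature-mask (length n_features) for monomials satisfied by input."""
--     # constant term always 1
--     feature_mask = 1 << mask_to_feature_idx[0]
--     # power-set doubling over the set input bits: (monomial mask, degree) pairs
--     subsets = [(0, 0)]
--     for i in range(18):
--         if (input_bits_mask >> i) & 1:
--             subsets += [(mk | (1 << i), dg + 1) for (mk, dg) in subsets]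
--     for mk, dg in subsets:
--         if 1 <= dg <= max_degree:
--             feature_mask |= 1 << mask_to_feature_idx[mk]
--     return feature_mask
-- ===== Notes on version B (the rewrite author's own statement) =====
-- stated objective: alternative
-- what changed: Replaces the per-degree itertools.combinations enumeration (with an inner loop re-building each monomial mask from scratch) by an iterative power-set doubling over the input bits that carries (mask, degree) pairs, followed by a single degree-filtering pass.
import Mathlib
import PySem

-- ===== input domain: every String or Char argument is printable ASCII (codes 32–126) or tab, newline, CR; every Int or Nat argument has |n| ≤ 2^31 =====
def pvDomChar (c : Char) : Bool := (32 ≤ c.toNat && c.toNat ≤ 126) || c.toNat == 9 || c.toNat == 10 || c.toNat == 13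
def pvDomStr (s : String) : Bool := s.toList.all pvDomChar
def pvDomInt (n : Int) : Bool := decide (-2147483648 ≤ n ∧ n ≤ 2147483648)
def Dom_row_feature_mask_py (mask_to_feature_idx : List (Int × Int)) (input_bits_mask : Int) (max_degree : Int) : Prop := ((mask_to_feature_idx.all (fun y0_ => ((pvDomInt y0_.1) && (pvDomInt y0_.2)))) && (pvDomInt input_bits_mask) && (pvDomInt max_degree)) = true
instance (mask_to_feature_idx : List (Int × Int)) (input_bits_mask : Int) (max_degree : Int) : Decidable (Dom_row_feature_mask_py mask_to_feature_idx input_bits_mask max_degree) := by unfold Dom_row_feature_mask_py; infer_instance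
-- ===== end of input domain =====

-- B replaces A's per-degree itertools.combinations enumeration by an iterative power-set
-- doubling over the input bits followed by one degree-filtering pass (objective: alternative).

-- ===== PORT A =====
-- shared small helpers (each is the literal Python expression it names)

-- '1 << k' for a nonnegative shift count
def pvPow (k : Nat) : Int := (1 : Int) <<< k

-- Python '(x >> i) & 1' truthiness; i is a range() element, so i.toNat is exact
def pvBitSet (x i : Int) : Bool := PySem.Int.band (x >>> i.toNat) 1 != 0

-- '[i for i in range(18) if ((input_bits_mask >> i) & 1)]'
def pvOnes (x : Int) : List Int := (PySem.List.pyRange 0 18 1).filter (fun i => pvBitSet x i)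

-- 'm = 0; for b in combo: m |= 1 << b'  (b ≥ 0 here, so b.toNat is exact)
def pvMaskOf (t : List Int) : Int :=
  t.foldl (fun m b => PySem.Int.bor m (pvPow b.toNat)) 0

-- '1 << mask_to_feature_idx[s]': first-match lookup; Pre_ excludes a missing key (KeyError)
-- and a negative index (ValueError on '1 << negative'), so getD 0 / toNat are exact on Pre_
def pvFeat (d : List (Int × Int)) (s : Int) : Int :=
  pvPow (((d.lookup s).getD 0).toNat)

-- itertools.combinations(l, n) in its documented order
def pvCombos : List Int → Nat → List (List Int)
  | _, 0 => [[]]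
  | [], _ + 1 => []
  | x :: xs, d + 1 => ((pvCombos xs d).map (fun c => x :: c)) ++ pvCombos xs (d + 1)

def row_feature_mask_py (mask_to_feature_idx : List (Int × Int)) (input_bits_mask : Int) (max_degree : Int) : Int :=
  let ones := pvOnes input_bits_mask
  let feature_mask := pvFeat mask_to_feature_idx 0
  (PySem.List.pyRange 1 (min max_degree (ones.length : Int) + 1) 1).foldl
    (fun fm dd =>
      (pvCombos ones dd.toNat).foldl
        (fun fm c => PySem.Int.bor fm (pvFeat mask_to_feature_idx (pvMaskOf c))) fm)
    feature_mask

-- ===== PORT B =====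
-- 'subsets += [(mk | (1 << i), dg + 1) for (mk, dg) in subsets]'
def pvStep (acc : List (Int × Int)) (i : Int) : List (Int × Int) :=
  acc ++ acc.map (fun p => (PySem.Int.bor p.1 (pvPow i.toNat), p.2 + 1))

def row_feature_mask_py_alt (mask_to_feature_idx : List (Int × Int)) (input_bits_mask : Int) (max_degree : Int) : Int :=
  let feature_mask := pvFeat mask_to_feature_idx 0
  let subsets := (PySem.List.pyRange 0 18 1).foldl
    (fun acc i => if pvBitSet input_bits_mask i then pvStep acc i else acc)
    [((0 : Int), (0 : Int))]
  subsets.foldl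
    (fun fm p => if 1 ≤ p.2 ∧ p.2 ≤ max_degree then PySem.Int.bor fm (pvFeat mask_to_feature_idx p.1) else fm)
    feature_mask

-- ===== PRECONDITION & SPEC =====
-- key s present with a nonnegative feature index (else Python raises KeyError / ValueError)
def pvKeyOK (d : List (Int × Int)) (s : Int) : Prop := 0 ≤ (d.lookup s).getD (-1)

-- Pre_ excludes exactly the inputs where A raises: a missing dict key for the constant term or
-- for some satisfied monomial mask of degree ≤ max_degree, or a negative feature index (1 << negative).
def Pre_row_feature_mask_py (mask_to_feature_idx : List (Int × Int)) (input_bits_mask : Int) (max_degree : Int) : Prop :=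
  pvKeyOK mask_to_feature_idx 0 ∧
  ∀ t ∈ (pvOnes input_bits_mask).sublists,
    (t ≠ [] ∧ (t.length : Int) ≤ max_degree) → pvKeyOK mask_to_feature_idx (pvMaskOf t)

instance (mask_to_feature_idx : List (Int × Int)) (input_bits_mask : Int) (max_degree : Int) : Decidable (Pre_row_feature_mask_py mask_to_feature_idx input_bits_mask max_degree) := by unfold Pre_row_feature_mask_py; unfold pvKeyOK; infer_instance

def pvWitness_row_feature_mask_py : (List (Int × Int)) × Int × Int := ([(0, 3), (1, 0), (2, 1), (3, 2)], 3, 2)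

def Spec_row_feature_mask_py (mask_to_feature_idx : List (Int × Int)) (input_bits_mask : Int) (max_degree : Int) (out : Int) : Prop := out = row_feature_mask_py_alt mask_to_feature_idx input_bits_mask max_degree
instance (mask_to_feature_idx : List (Int × Int)) (input_bits_mask : Int) (max_degree : Int) (out : Int) : Decidable (Spec_row_feature_mask_py mask_to_feature_idx input_bits_mask max_degree out) := by unfold Spec_row_feature_mask_py; infer_instance

-- ===== CLAIM (what is proved, stated in full; the proofs are below) =====
def Claim_equal_row_feature_mask_py : Prop := ∀ (mask_to_feature_idx : List (Int × Int)) (input_bits_mask : Int) (max_degree : Int), Dom_row_feature_mask_py mask_to_feature_idx input_bits_mask max_degree → Pre_row_feature_mask_py mask_to_feature_idx input_bits_mask max_degree → Spec_row_feature_mask_py mask_to_feature_idx input_bits_mask max_degree (row_feature_mask_py mask_to_feature_idx input_bits_mask max_degree)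

-- ===== LEMMAS AND PROOFS =====

theorem pvWitness_ok :
    Dom_row_feature_mask_py pvWitness_row_feature_mask_py.1 pvWitness_row_feature_mask_py.2.1 pvWitness_row_feature_mask_py.2.2 ∧
    Pre_row_feature_mask_py pvWitness_row_feature_mask_py.1 pvWitness_row_feature_mask_py.2.1 pvWitness_row_feature_mask_py.2.2 := by
  decide

-- nonneg bitwise-or algebra
theorem pvPow_nonneg (k : Nat) : 0 ≤ pvPow k := by
  simp only [pvPow, Int.shiftLeft_eq, one_mul]
  positivity

theorem pvFeat_nonneg (d : List (Int × Int)) (s : Int) : 0 ≤ pvFeat d s :=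
  pvPow_nonneg _

theorem pvBor_nonneg {a b : Int} (ha : 0 ≤ a) (hb : 0 ≤ b) : 0 ≤ PySem.Int.bor a b := by
  rw [PySem.Int.bor_of_nonneg ha hb]; exact Int.natCast_nonneg _

theorem pvBor_assoc {a b c : Int} (ha : 0 ≤ a) (hb : 0 ≤ b) (hc : 0 ≤ c) :
    PySem.Int.bor (PySem.Int.bor a b) c = PySem.Int.bor a (PySem.Int.bor b c) := by
  rw [PySem.Int.bor_of_nonneg ha hb, PySem.Int.bor_of_nonneg hb hc,
      PySem.Int.bor_of_nonneg (Int.natCast_nonneg _) hc,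
      PySem.Int.bor_of_nonneg ha (Int.natCast_nonneg _)]
  simp [Nat.lor_assoc]

theorem pvBor_self {a : Int} (ha : 0 ≤ a) : PySem.Int.bor a a = a := by
  rw [PySem.Int.bor_of_nonneg ha ha]
  simp [Int.toNat_of_nonneg ha]

-- OR of the feature bits of a list of monomial masks
def pvOrA (d : List (Int × Int)) (ms : List Int) : Int :=
  ms.foldr (fun s acc => PySem.Int.bor (pvFeat d s) acc) 0

theorem pvOrA_nonneg (d : List (Int × Int)) (ms : List Int) : 0 ≤ pvOrA d ms := by
  induction ms with
  | nil => simp [pvOrA]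
  | cons s ms ih => exact pvBor_nonneg (pvFeat_nonneg d s) ih

theorem pvFoldl_orA (d : List (Int × Int)) (ms : List Int) :
    ∀ init : Int, 0 ≤ init →
      ms.foldl (fun fm s => PySem.Int.bor fm (pvFeat d s)) init = PySem.Int.bor init (pvOrA d ms) := by
  induction ms with
  | nil => intro init _; simp [pvOrA, PySem.Int.bor_zero]
  | cons s ms ih =>
      intro init hinit
      simp only [List.foldl_cons, pvOrA, List.foldr_cons]
      rw [ih _ (pvBor_nonneg hinit (pvFeat_nonneg d s)),
          pvBor_assoc hinit (pvFeat_nonneg d s) (pvOrA_nonneg d ms)]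
      rfl

theorem pvMem_bor_orA {d : List (Int × Int)} {s : Int} {ms : List Int} (h : s ∈ ms) :
    PySem.Int.bor (pvFeat d s) (pvOrA d ms) = pvOrA d ms := by
  induction ms with
  | nil => cases h
  | cons a ms ih =>
      rcases List.mem_cons.mp h with rfl | hmem
      · show PySem.Int.bor (pvFeat d s) (PySem.Int.bor (pvFeat d s) (pvOrA d ms)) = _
        rw [← pvBor_assoc (pvFeat_nonneg d s) (pvFeat_nonneg d s) (pvOrA_nonneg d ms),
            pvBor_self (pvFeat_nonneg d s)]
        rfl
      · show PySem.Int.bor (pvFeat d s) (PySem.Int.bor (pvFeat d a) (pvOrA d ms)) = _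
        rw [← pvBor_assoc (pvFeat_nonneg d s) (pvFeat_nonneg d a) (pvOrA_nonneg d ms),
            PySem.Int.bor_comm (pvFeat d s) (pvFeat d a),
            pvBor_assoc (pvFeat_nonneg d a) (pvFeat_nonneg d s) (pvOrA_nonneg d ms),
            ih hmem]
        rfl

theorem pvSubset_orA {d : List (Int × Int)} {ms₁ ms₂ : List Int} (h : ms₁ ⊆ ms₂) :
    PySem.Int.bor (pvOrA d ms₁) (pvOrA d ms₂) = pvOrA d ms₂ := by
  induction ms₁ with
  | nil =>
      rw [PySem.Int.bor_comm]
      simp [pvOrA, PySem.Int.bor_zero]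
  | cons s ms₁ ih =>
      have hs : s ∈ ms₂ := h List.mem_cons_self
      have hsub : ms₁ ⊆ ms₂ := fun _ hx => h (List.mem_cons_of_mem _ hx)
      show PySem.Int.bor (PySem.Int.bor (pvFeat d s) (pvOrA d ms₁)) (pvOrA d ms₂) = _
      rw [pvBor_assoc (pvFeat_nonneg d s) (pvOrA_nonneg d ms₁) (pvOrA_nonneg d ms₂),
          ih hsub, pvMem_bor_orA hs]

theorem pvOrA_congr {d : List (Int × Int)} {ms₁ ms₂ : List Int}
    (h : ∀ s, s ∈ ms₁ ↔ s ∈ ms₂) : pvOrA d ms₁ = pvOrA d ms₂ := by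
  have h12 := pvSubset_orA (d := d) (fun x hx => (h x).mp hx)
  have h21 := pvSubset_orA (d := d) (fun x hx => (h x).mpr hx)
  rw [PySem.Int.bor_comm] at h21
  rw [← h12, h21]

-- A's nested per-degree folds = one fold over the flattened mask list
theorem pvA_flat (d : List (Int × Int)) (ones : List Int) :
    ∀ (degs : List Int) (init : Int),
      degs.foldl (fun fm dd => (pvCombos ones dd.toNat).foldl
          (fun fm c => PySem.Int.bor fm (pvFeat d (pvMaskOf c))) fm) init =
        ((degs.map (fun dd => (pvCombos ones dd.toNat).map pvMaskOf)).flatten).foldl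
          (fun fm s => PySem.Int.bor fm (pvFeat d s)) init := by
  intro degs
  induction degs with
  | nil => intro init; rfl
  | cons a degs ih => intro init; simp [List.foldl_append, List.foldl_map, ih]

-- B's guarded output fold = one fold over the filtered, projected mask list
theorem pvB_flat (d : List (Int × Int)) (maxd : Int) :
    ∀ (subsets : List (Int × Int)) (init : Int),
      subsets.foldl (fun fm p => if 1 ≤ p.2 ∧ p.2 ≤ maxd then
          PySem.Int.bor fm (pvFeat d p.1) else fm) init =
        ((subsets.filter (fun p => decide (1 ≤ p.2 ∧ p.2 ≤ maxd))).map Prod.fst).foldl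
          (fun fm s => PySem.Int.bor fm (pvFeat d s)) init := by
  intro subsets
  induction subsets with
  | nil => intro init; rfl
  | cons p subsets ih =>
      intro init
      by_cases hp : 1 ≤ p.2 ∧ p.2 ≤ maxd <;> simp [hp, ih]

-- B's guarded builder fold = fold of pvStep over the ones list
theorem pvBuild_eq (x : Int) :
    (PySem.List.pyRange 0 18 1).foldl
        (fun acc i => if pvBitSet x i then pvStep acc i else acc)
        [((0 : Int), (0 : Int))] = (pvOnes x).foldl pvStep [((0 : Int), (0 : Int))] := by
  rw [pvOnes, List.foldl_filter]

-- membership in pvCombos = sublists of the given length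
theorem pvMem_pvCombos : ∀ (l : List Int) (n : Nat) (c : List Int),
    c ∈ pvCombos l n ↔ c.Sublist l ∧ c.length = n := by
  intro l
  induction l with
  | nil =>
      intro n c
      cases n with
      | zero => simp [pvCombos, List.sublist_nil, List.length_eq_zero_iff]
      | succ n =>
          simp only [pvCombos, List.not_mem_nil, false_iff, not_and]
          intro hs
          rw [List.sublist_nil.mp hs]
          simp
  | cons x xs ih =>
      intro n c
      cases n with
      | zero =>
          simp only [pvCombos, List.mem_singleton]
          constructor
          · rintro rfl; exact ⟨List.nil_sublist _, rfl⟩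
          · rintro ⟨_, hl⟩; exact List.length_eq_zero_iff.mp hl
      | succ d =>
          simp only [pvCombos, List.mem_append, List.mem_map, ih]
          constructor
          · rintro (⟨c', ⟨hs, hl⟩, rfl⟩ | ⟨hs, hl⟩)
            · exact ⟨List.cons_sublist_cons.mpr hs, by simp [hl]⟩
            · exact ⟨hs.trans (List.sublist_cons_self x xs), hl⟩
          · rintro ⟨hs, hl⟩
            rcases List.sublist_cons_iff.mp hs with hs' | ⟨r, rfl, hr⟩
            · exact Or.inr ⟨hs', hl⟩
            · exact Or.inl ⟨r, ⟨hr, by simpa using hl⟩, rfl⟩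

theorem pvMaskOf_concat (t : List Int) (i : Int) :
    pvMaskOf (t ++ [i]) = PySem.Int.bor (pvMaskOf t) (pvPow i.toNat) := by
  simp only [pvMaskOf, List.foldl_append, List.foldl_cons, List.foldl_nil]

theorem pvSublist_concat_iff {t u : List Int} {i : Int} :
    t.Sublist (u ++ [i]) ↔ t.Sublist u ∨ ∃ t₀, t = t₀ ++ [i] ∧ t₀.Sublist u := by
  constructor
  · intro h
    have h' : t.reverse.Sublist (i :: u.reverse) := by
      simpa using List.reverse_sublist.mpr h
    rcases List.sublist_cons_iff.mp h' with hs | ⟨r, hr, hrs⟩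
    · left; rwa [List.reverse_sublist] at hs
    · right
      refine ⟨r.reverse, ?_, ?_⟩
      · have := congrArg List.reverse hr
        simpa using this
      · rw [← List.reverse_sublist]; simpa using hrs
  · rintro (h | ⟨t₀, rfl, h⟩)
    · exact h.trans (List.sublist_append_left u [i])
    · exact h.append (List.Sublist.refl [i])

-- membership in B's power-set doubling accumulator
theorem pvMem_build : ∀ (u : List Int) (p : Int × Int),
    p ∈ u.foldl pvStep [((0 : Int), (0 : Int))] ↔
      ∃ t, t.Sublist u ∧ p = (pvMaskOf t, (t.length : Int)) := by
  intro u
  induction u using List.reverseRecOn with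
  | nil =>
      intro p
      simp only [List.foldl_nil, List.mem_singleton]
      constructor
      · rintro rfl; exact ⟨[], List.nil_sublist _, by simp [pvMaskOf]⟩
      · rintro ⟨t, ht, rfl⟩
        rw [List.sublist_nil.mp ht]
        simp [pvMaskOf]
  | append_singleton u i ih =>
      intro p
      rw [List.foldl_append]
      simp only [List.foldl_cons, List.foldl_nil]
      constructor
      · intro hp
        rcases List.mem_append.mp hp with hp | hp
        · rcases (ih p).mp hp with ⟨t, ht, rfl⟩
          exact ⟨t, ht.trans (List.sublist_append_left u [i]), rfl⟩
        · rcases List.mem_map.mp hp with ⟨q, hq, rfl⟩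
          rcases (ih q).mp hq with ⟨t, ht, rfl⟩
          refine ⟨t ++ [i], pvSublist_concat_iff.mpr (Or.inr ⟨t, rfl, ht⟩), ?_⟩
          simp [pvMaskOf_concat]
      · rintro ⟨t, ht, rfl⟩
        rcases pvSublist_concat_iff.mp ht with ht' | ⟨t₀, rfl, ht₀⟩
        · exact List.mem_append.mpr (Or.inl ((ih _).mpr ⟨t, ht', rfl⟩))
        · refine List.mem_append.mpr (Or.inr (List.mem_map.mpr
            ⟨(pvMaskOf t₀, (t₀.length : Int)), (ih _).mpr ⟨t₀, ht₀, rfl⟩, ?_⟩))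
          simp [pvMaskOf_concat]

-- the common description of the monomial masks both programs visit
theorem pvMem_msA (x maxd s : Int) :
    (s ∈ ((PySem.List.pyRange 1 (min maxd ((pvOnes x).length : Int) + 1) 1).map
        (fun dd => (pvCombos (pvOnes x) dd.toNat).map pvMaskOf)).flatten) ↔
      ∃ t, t.Sublist (pvOnes x) ∧ 1 ≤ t.length ∧ (t.length : Int) ≤ maxd ∧ s = pvMaskOf t := by
  simp only [List.mem_flatten, List.mem_map, PySem.List.mem_pyRange_one]
  constructor
  · rintro ⟨_, ⟨dd, ⟨h1, h2⟩, rfl⟩, hs⟩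
    rcases List.mem_map.mp hs with ⟨c, hc, rfl⟩
    rcases (pvMem_pvCombos _ _ _).mp hc with ⟨hsub, hlen⟩
    have hdd : (c.length : Int) = dd := by
      rw [hlen]; exact Int.toNat_of_nonneg (by omega)
    refine ⟨c, hsub, ?_, ?_, rfl⟩
    · omega
    · have := min_le_left maxd ((pvOnes x).length : Int); omega
  · rintro ⟨t, hsub, h1, h2, rfl⟩
    have hlen : (t.length : Int) ≤ ((pvOnes x).length : Int) := by
      exact_mod_cast hsub.length_le
    refine ⟨(pvCombos (pvOnes x) t.length).map pvMaskOf,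
      ⟨(t.length : Int), ⟨by omega, by
        have := le_min h2 hlen; omega⟩, by simp⟩, ?_⟩
    exact List.mem_map.mpr ⟨t, (pvMem_pvCombos _ _ _).mpr ⟨hsub, rfl⟩, rfl⟩

theorem pvMem_msB (x maxd s : Int) :
    (s ∈ (((pvOnes x).foldl pvStep [((0 : Int), (0 : Int))]).filter
        (fun p => decide (1 ≤ p.2 ∧ p.2 ≤ maxd))).map Prod.fst) ↔
      ∃ t, t.Sublist (pvOnes x) ∧ 1 ≤ t.length ∧ (t.length : Int) ≤ maxd ∧ s = pvMaskOf t := by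
  simp only [List.mem_map, List.mem_filter, decide_eq_true_eq]
  constructor
  · rintro ⟨p, ⟨hp, h1, h2⟩, rfl⟩
    rcases (pvMem_build _ _).mp hp with ⟨t, ht, rfl⟩
    refine ⟨t, ht, ?_, h2, rfl⟩
    have h1' : (1 : Int) ≤ (t.length : Int) := h1
    exact_mod_cast h1'
  · rintro ⟨t, ht, h1, h2, rfl⟩
    refine ⟨(pvMaskOf t, (t.length : Int)), ⟨(pvMem_build _ _).mpr ⟨t, ht, rfl⟩, ?_, h2⟩, rfl⟩
    show (1 : Int) ≤ (t.length : Int)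
    exact_mod_cast h1

theorem pv_main (d : List (Int × Int)) (x maxd : Int) :
    row_feature_mask_py d x maxd = row_feature_mask_py_alt d x maxd := by
  unfold row_feature_mask_py row_feature_mask_py_alt
  show (PySem.List.pyRange 1 (min maxd ((pvOnes x).length : Int) + 1) 1).foldl
      (fun fm dd => (pvCombos (pvOnes x) dd.toNat).foldl
        (fun fm c => PySem.Int.bor fm (pvFeat d (pvMaskOf c))) fm) (pvFeat d 0) =
    ((PySem.List.pyRange 0 18 1).foldl
        (fun acc i => if pvBitSet x i then pvStep acc i else acc)
        [((0 : Int), (0 : Int))]).foldl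
      (fun fm p => if 1 ≤ p.2 ∧ p.2 ≤ maxd then
        PySem.Int.bor fm (pvFeat d (Prod.fst p)) else fm) (pvFeat d 0)
  rw [pvA_flat, pvBuild_eq, pvB_flat,
      pvFoldl_orA d _ _ (pvFeat_nonneg d 0), pvFoldl_orA d _ _ (pvFeat_nonneg d 0)]
  congr 1
  exact pvOrA_congr (fun s => (pvMem_msA x maxd s).trans (pvMem_msB x maxd s).symm)

-- ===== VERDICT (by name: the statement is the Claim_ definition above) =====
theorem row_feature_mask_py_spec : Claim_equal_row_feature_mask_py := by
  intro d x maxd _ _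
  unfold Spec_row_feature_mask_py
  exact pv_main d x maxd
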